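-- pv_equiv track=rewrite | github.com/goodsmash/enhanced-typing-assistant | text_correction.py | split_preserve_spacing
-- ===== SOURCE A (Python) =====
-- from typing import Dict, List, Optional, Tuple
--
-- def split_preserve_spacing(text: str) -> List[Tuple[str, str]]:
--     """Split text into words while preserving spacing"""
--     words = []
--     current_word = ""
--     current_space = ""
--
--     for char in text:
--         if char.isspace():
--             if current_word:
--                 words.append((current_word, current_space))
--                 current_word = ""
--             current_space += char
--         else:
--             if current_space and not current_word:
--                 words.append(("", current_space))
--                 current_space = ""
--             current_word += char
--
--     if current_word or current_space:
--         words.append((current_word, current_space))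
--
--     return words
-- ===== SOURCE B (Python) =====
-- from typing import Dict, List, Optional, Tuple
--
-- def split_preserve_spacing(text: str) -> List[Tuple[str, str]]:
--     """Split text into words while preserving spacing"""
--     runs = []
--     i, n = 0, len(text)
--     while i < n:
--         is_sp = text[i].isspace()
--         j = i + 1
--         while j < n and text[j].isspace() == is_sp:
--             j += 1
--         run = text[i:j]
--         runs.append(("", run) if is_sp else (run, ""))
--         i = j
--     return runs
-- ===== Notes on version B (the rewrite author's own statement) =====
-- stated objective: simpler
-- what changed: Replaced the per-character state machine (current_word/current_space accumulators with flush-on-transition branches) by a direct run extraction: scan to the end of each maximal same-kind run and slice it out, emitting one pair per run.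
import Mathlib
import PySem

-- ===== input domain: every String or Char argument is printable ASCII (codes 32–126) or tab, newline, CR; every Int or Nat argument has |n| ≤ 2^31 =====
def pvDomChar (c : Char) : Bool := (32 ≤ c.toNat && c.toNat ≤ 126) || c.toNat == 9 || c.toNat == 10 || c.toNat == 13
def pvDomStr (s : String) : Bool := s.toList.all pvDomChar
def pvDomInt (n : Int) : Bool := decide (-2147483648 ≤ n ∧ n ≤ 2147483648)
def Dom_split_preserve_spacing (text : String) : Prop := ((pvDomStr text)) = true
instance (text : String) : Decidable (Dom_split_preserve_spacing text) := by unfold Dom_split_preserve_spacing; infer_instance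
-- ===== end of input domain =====

-- B replaces A's per-character state machine by direct extraction of maximal same-kind runs (objective: simpler).

-- ===== PORT A =====
-- loop body of A: state = (words, current_word, current_space); Python strs carried as List Char
def spsA_step (st : List (String × String) × List Char × List Char) (c : Char) :
    List (String × String) × List Char × List Char :=
  let (words, cw, cs) := st
  if PySem.Chars.isspace c then
    if cw ≠ [] then (words ++ [(String.ofList cw, String.ofList cs)], [], cs ++ [c])
    else (words, cw, cs ++ [c])
  else
    if cs ≠ [] ∧ cw = [] then (words ++ [("", String.ofList cs)], [c], [])
    else (words, cw ++ [c], cs)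

-- A's trailing 'if current_word or current_space: words.append(...)'
def spsA_fin (st : List (String × String) × List Char × List Char) : List (String × String) :=
  let (words, cw, cs) := st
  if cw ≠ [] ∨ cs ≠ [] then words ++ [(String.ofList cw, String.ofList cs)] else words

def split_preserve_spacing (text : String) : List (String × String) :=
  spsA_fin (text.toList.foldl spsA_step ([], [], []))

-- ===== PORT B =====
-- B's outer while loop: take the maximal run of the head's kind (inner index scan = takeWhile/dropWhile), emit one pair, continue
def spsB_runs : List Char → List (String × String)
  | [] => []
  | c :: rest =>
    let sp := PySem.Chars.isspace c
    let run := c :: rest.takeWhile (fun d => PySem.Chars.isspace d == sp)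
    let rem := rest.dropWhile (fun d => PySem.Chars.isspace d == sp)
    (if sp then ("", String.ofList run) else (String.ofList run, "")) :: spsB_runs rem
  termination_by l => l.length
  decreasing_by
    have := List.length_dropWhile_le (fun d => PySem.Chars.isspace d == PySem.Chars.isspace c) rest
    simp only [List.length_cons]; omega

def split_preserve_spacing_alt (text : String) : List (String × String) :=
  spsB_runs text.toList

-- ===== PRECONDITION & SPEC =====
def Spec_split_preserve_spacing (text : String) (out : List (String × String)) : Prop := out = split_preserve_spacing_alt text
instance (text : String) (out : List (String × String)) : Decidable (Spec_split_preserve_spacing text out) := by unfold Spec_split_preserve_spacing; infer_instance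

-- ===== CLAIM (what is proved, stated in full; the proofs are below) =====
def Claim_equal_split_preserve_spacing : Prop := ∀ (text : String), Dom_split_preserve_spacing text → Spec_split_preserve_spacing text (split_preserve_spacing text)

-- ===== LEMMAS AND PROOFS =====

-- a maximal run prepended to a list whose head is of the other kind contributes exactly one pair
lemma spsB_runs_append (r l : List Char) (k : Bool) (hr : r ≠ [])
    (huni : ∀ c ∈ r, PySem.Chars.isspace c = k)
    (hl : ∀ c, l.head? = some c → PySem.Chars.isspace c ≠ k) :
    spsB_runs (r ++ l) = (if k then ("", String.ofList r) else (String.ofList r, "")) :: spsB_runs l := by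
  obtain ⟨a, r', rfl⟩ := List.exists_cons_of_ne_nil hr
  have ha : PySem.Chars.isspace a = k := huni a (by simp)
  have hr' : ∀ c ∈ r', (fun d => PySem.Chars.isspace d == k) c = true := by
    intro c hc; simp [huni c (by simp [hc])]
  have hlt : List.takeWhile (fun d => PySem.Chars.isspace d == k) l = [] := by
    cases l with
    | nil => rfl
    | cons b t =>
      have hb : (PySem.Chars.isspace b == k) = false := beq_eq_false_iff_ne.mpr (hl b rfl)
      simp [List.takeWhile, hb]
  have hld : List.dropWhile (fun d => PySem.Chars.isspace d == k) l = l := by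
    cases l with
    | nil => rfl
    | cons b t =>
      have hb : (PySem.Chars.isspace b == k) = false := beq_eq_false_iff_ne.mpr (hl b rfl)
      simp [List.dropWhile, hb]
  have htake : List.takeWhile (fun d => PySem.Chars.isspace d == k) (r' ++ l) = r' := by
    rw [List.takeWhile_append_of_pos hr', hlt, List.append_nil]
  have hdrop : List.dropWhile (fun d => PySem.Chars.isspace d == k) (r' ++ l) = l := by
    rw [List.dropWhile_append_of_pos hr', hld]
  simp [spsB_runs, ha, htake, hdrop]

-- invariant-carrying characterisation of A's fold
lemma spsA_master (l : List Char) (w : List (String × String)) (cw cs : List Char)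
    (hcw : ∀ c ∈ cw, PySem.Chars.isspace c = false)
    (hcs : ∀ c ∈ cs, PySem.Chars.isspace c = true)
    (hinv : cw ≠ [] → cs = []) :
    spsA_fin (l.foldl spsA_step (w, cw, cs)) = w ++ spsB_runs (cs ++ cw ++ l) := by
  induction l generalizing w cw cs with
  | nil =>
    cases hcwE : cw with
    | nil =>
      cases hcsE : cs with
      | nil => simp [spsA_fin, spsB_runs]
      | cons b t =>
        rw [List.foldl_nil]
        have := spsB_runs_append (b :: t) [] true (by simp)
          (by intro c hc; exact hcs c (hcsE ▸ hc)) (by intro c hc; simp at hc)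
        rw [List.append_nil] at this
        simp only [List.append_nil]
        rw [this]
        simp [spsA_fin, spsB_runs]
    | cons a t =>
      have hcs0 : cs = [] := hinv (by simp [hcwE])
      subst hcs0
      rw [List.foldl_nil]
      have := spsB_runs_append (a :: t) [] false (by simp)
        (by intro c hc; exact hcw c (hcwE ▸ hc)) (by intro c hc; simp at hc)
      rw [List.append_nil] at this
      simp only [List.nil_append, List.append_nil]
      rw [this]
      simp [spsA_fin, spsB_runs]
  | cons c l' IH =>
    rw [List.foldl_cons]
    by_cases hsp : PySem.Chars.isspace c = true
    · by_cases hcwE : cw = []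
      · have hstep : spsA_step (w, cw, cs) c = (w, cw, cs ++ [c]) := by
          simp [spsA_step, hsp, hcwE]
        rw [hstep, hcwE] at *
        rw [IH w [] (cs ++ [c]) (by simp)
          (by intro d hd; rcases List.mem_append.mp hd with h | h
              · exact hcs d h
              · simp at h; simpa [h] using hsp) (by simp)]
        simp
      · have hcs0 : cs = [] := hinv hcwE
        subst hcs0
        have hstep : spsA_step (w, cw, []) c =
            (w ++ [(String.ofList cw, String.ofList [])], [], [] ++ [c]) := by
          simp [spsA_step, hsp, hcwE]
        rw [hstep]
        rw [IH (w ++ [(String.ofList cw, String.ofList [])]) [] ([] ++ [c]) (by simp)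
          (by intro d hd; simp at hd; subst hd; exact hsp) (by simp)]
        have := spsB_runs_append cw (c :: l') false hcwE (fun d hd => hcw d hd)
          (by intro d hd; simp at hd; subst hd; simp [hsp])
        simp only [List.nil_append]
        rw [this]
        have h0 : String.ofList ([] : List Char) = "" := rfl
        simp [h0]
    · by_cases hfl : cs ≠ [] ∧ cw = []
      · obtain ⟨hcsne, hcw0⟩ := hfl
        subst hcw0
        have hstep : spsA_step (w, [], cs) c = (w ++ [("", String.ofList cs)], [c], []) := by
          simp [spsA_step, hsp, hcsne]
        rw [hstep]
        rw [IH (w ++ [("", String.ofList cs)]) [c] []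
          (by intro d hd; simp at hd; subst hd; simpa using hsp) (by simp) (by simp)]
        have := spsB_runs_append cs (c :: l') true hcsne (fun d hd => hcs d hd)
          (by intro d hd; simp at hd; subst hd; simpa using hsp)
        simp only [List.append_nil, List.nil_append]
        rw [this]
        simp
      · have hcs0 : cs = [] := by
          rcases not_and_or.mp hfl with h | h
          · exact not_ne_iff.mp h
          · exact hinv h
        subst hcs0
        have hstep : spsA_step (w, cw, []) c = (w, cw ++ [c], []) := by
          simp [spsA_step, hsp]
        rw [hstep]
        rw [IH w (cw ++ [c]) []
          (by intro d hd; rcases List.mem_append.mp hd with h | h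
              · exact hcw d h
              · simp at h; subst h; simpa using hsp) (by simp) (by simp)]
        simp

-- ===== VERDICT (by name: the statement is the Claim_ definition above) =====
theorem split_preserve_spacing_spec : Claim_equal_split_preserve_spacing := by
  intro text _
  unfold Spec_split_preserve_spacing split_preserve_spacing split_preserve_spacing_alt
  simpa using spsA_master text.toList [] [] [] (by simp) (by simp) (by simp)
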